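-- pv_equiv track=rewrite | github.com/Aerysaint/Paddy | backend/app.py | heuristic_headings
-- ===== SOURCE A (Python) =====
-- from typing import List, Optional, Dict, Any, Tuple
--
-- def heuristic_headings(lines: List[str]) -> List[str]:
--     """
--     Naive heading detection: treat short Title Case or ALL CAPS lines as headings.
--     Returns a list the same length as lines with the most recent detected heading
--     propagated, or None if none seen yet.
--     """
--     heads: List[Optional[str]] = []
--     last_head: Optional[str] = None
--     for ln in lines:
--         s = ln.strip()
--         if not s:
--             heads.append(last_head)
--             continue
--         words = s.split()
--         is_title = s.istitle() or (s[:1].isupper() and any(c.islower() for c in s[1:]))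
--         is_all_caps = s.isupper()
--         if (is_title or is_all_caps) and len(words) <= 12 and len(s) <= 120:
--             last_head = s
--         heads.append(last_head)
--     # type: ignore[return-value] — allow Optional[str]s; consumers guard appropriately
--     return heads  # type: ignore[return-value]
-- ===== SOURCE B (Python) =====
-- from typing import List, Optional, Tuple
--
--
-- def _detect(ln: str) -> Optional[str]:
--     """Return the stripped line if it looks like a heading, else None."""
--     s = ln.strip()
--     if not s:
--         return None
--     is_title = s.istitle() or (s[:1].isupper() and any(c.islower() for c in s[1:]))
--     if not (is_title or s.isupper()):
--         return None
--     if len(s.split()) > 12 or len(s) > 120: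
--         return None
--     return s
--
--
-- def _spans(marks: List[Tuple[int, str]], n: int) -> List[Optional[str]]:
--     """Run-length expansion: each heading covers the lines up to the next heading."""
--     out: List[Optional[str]] = []
--     for k, (i, s) in enumerate(marks):
--         nxt = marks[k + 1][0] if k + 1 < len(marks) else n
--         out += [s] * (nxt - i)
--     return out
--
--
-- def heuristic_headings(lines: List[str]) -> List[str]:
--     n = len(lines)
--     marks = [(i, s) for i, ln in enumerate(lines) if (s := _detect(ln)) is not None]
--     if not marks:
--         return [None] * n
--     return [None] * marks[0][0] + _spans(marks, n)
-- ===== Notes on version B (the rewrite author's own statement) =====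
-- stated objective: alternative
-- what changed: Propagation is no longer a per-line forward-fill accumulator: B collects the (index, heading) marks once, then constructs the output by run-length block replication ([head]*(next_index - index)) between consecutive heading positions, with a leading None block.
import Mathlib
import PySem

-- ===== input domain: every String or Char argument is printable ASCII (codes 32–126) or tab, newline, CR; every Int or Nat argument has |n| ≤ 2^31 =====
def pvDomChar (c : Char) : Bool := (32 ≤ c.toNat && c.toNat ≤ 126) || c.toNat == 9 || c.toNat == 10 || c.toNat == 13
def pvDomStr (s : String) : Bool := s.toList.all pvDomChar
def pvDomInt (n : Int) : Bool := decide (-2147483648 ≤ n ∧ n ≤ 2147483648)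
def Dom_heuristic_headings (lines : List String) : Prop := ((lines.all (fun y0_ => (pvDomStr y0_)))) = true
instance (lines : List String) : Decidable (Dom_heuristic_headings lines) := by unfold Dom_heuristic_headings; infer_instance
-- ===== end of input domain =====

-- B replaces A's per-line forward-fill accumulator by collecting (index, heading) marks and
-- run-length block replication between consecutive heading positions; same cost.
-- ===== PORT A =====
-- hand port of str.istitle() (exact on ASCII: cased chars are the letters)
def pyTitleAux : List Char → Bool → Bool → Bool
  | [], _, cased => cased
  | c :: rest, prevCased, cased =>
    if PySem.Chars.isupper c then
      if prevCased then false else pyTitleAux rest true true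
    else if PySem.Chars.islower c then
      if prevCased then pyTitleAux rest true true else false
    else pyTitleAux rest false cased

def pyIstitle (cs : List Char) : Bool := pyTitleAux cs false false

-- hand port of str.isupper() (exact on ASCII: some cased char, and no lowercase char)
def pyIsupperStr (cs : List Char) : Bool :=
  cs.any PySem.Chars.isupper && cs.all (fun c => !PySem.Chars.islower c)

def heuristic_headings (lines : List String) : List (Option String) :=
  (lines.foldl (fun (st : List (Option String) × Option String) ln =>
      let s := PySem.Str.strip ln
      if s.toList.isEmpty then (st.1 ++ [st.2], st.2)
      else
        let words := PySem.Chars.split₀ s.toList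
        let isTitle := pyIstitle s.toList ||
          (pyIsupperStr (s.toList.take 1) && (s.toList.drop 1).any PySem.Chars.islower)
        let isAllCaps := pyIsupperStr s.toList
        if (isTitle || isAllCaps) && decide (words.length ≤ 12) && decide (s.toList.length ≤ 120)
        then (st.1 ++ [some s], some s)
        else (st.1 ++ [st.2], st.2))
    ([], none)).1

-- ===== PORT B =====
def detectHeading (ln : String) : Option String :=
  let s := PySem.Str.strip ln
  if s.toList.isEmpty then none
  else
    let isTitle := pyIstitle s.toList ||
      (pyIsupperStr (s.toList.take 1) && (s.toList.drop 1).any PySem.Chars.islower)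
    if !(isTitle || pyIsupperStr s.toList) then none
    else if decide (12 < (PySem.Chars.split₀ s.toList).length) || decide (120 < s.toList.length) then none
    else some s

-- the '[(i, s) for i, ln in enumerate(lines) if (s := _detect(ln)) is not None]' comprehension,
-- carrying the enumerate counter
def marksFrom (k : Nat) : List String → List (Nat × String)
  | [] => []
  | ln :: rest =>
    match detectHeading ln with
    | some s => (k, s) :: marksFrom (k + 1) rest
    | none => marksFrom (k + 1) rest

-- port of _spans: run-length expansion of consecutive heading marks
def spans : List (Nat × String) → Nat → List (Option String)
  | [], _ => []
  | (i, s) :: rest, n =>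
    match rest with
    | [] => List.replicate (n - i) (some s)
    | (j, _) :: _ => List.replicate (j - i) (some s) ++ spans rest n

def heuristic_headings_alt (lines : List String) : List (Option String) :=
  let n := lines.length
  match marksFrom 0 lines with
  | [] => List.replicate n none
  | ms@((i0, _) :: _) => List.replicate i0 none ++ spans ms n

-- ===== PRECONDITION & SPEC =====
def Spec_heuristic_headings (lines : List String) (out : List (Option String)) : Prop := out = heuristic_headings_alt lines
instance (lines : List String) (out : List (Option String)) : Decidable (Spec_heuristic_headings lines out) := by unfold Spec_heuristic_headings; infer_instance

-- ===== CLAIM (what is proved, stated in full; the proofs are below) =====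
def Claim_equal_heuristic_headings : Prop := ∀ (lines : List String), Dom_heuristic_headings lines → Spec_heuristic_headings lines (heuristic_headings lines)

-- ===== LEMMAS AND PROOFS =====
-- A's loop body, named for the proofs (definitionally the lambda inside heuristic_headings)
def stepA (st : List (Option String) × Option String) (ln : String) : List (Option String) × Option String :=
  let s := PySem.Str.strip ln
  if s.toList.isEmpty then (st.1 ++ [st.2], st.2)
  else
    let words := PySem.Chars.split₀ s.toList
    let isTitle := pyIstitle s.toList ||
      (pyIsupperStr (s.toList.take 1) && (s.toList.drop 1).any PySem.Chars.islower)
    let isAllCaps := pyIsupperStr s.toList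
    if (isTitle || isAllCaps) && decide (words.length ≤ 12) && decide (s.toList.length ≤ 120)
    then (st.1 ++ [some s], some s)
    else (st.1 ++ [st.2], st.2)

-- the detection condition, as one Bool
def condA (ln : String) : Bool :=
  !(PySem.Str.strip ln).toList.isEmpty &&
  ((pyIstitle (PySem.Str.strip ln).toList ||
      (pyIsupperStr ((PySem.Str.strip ln).toList.take 1) &&
        ((PySem.Str.strip ln).toList.drop 1).any PySem.Chars.islower) ||
      pyIsupperStr (PySem.Str.strip ln).toList) &&
    decide ((PySem.Chars.split₀ (PySem.Str.strip ln).toList).length ≤ 12) &&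
    decide ((PySem.Str.strip ln).toList.length ≤ 120))

def updA (last : Option String) (ln : String) : Option String :=
  if condA ln then some (PySem.Str.strip ln) else last

-- proof-side forward-fill: the intermediate between A's fold and B's blocks
def fillForward : Option String → List (Option String) → List (Option String)
  | _, [] => []
  | cur, r :: rs =>
    let cur' := if r.isSome then r else cur
    cur' :: fillForward cur' rs

theorem heuristic_headings_eq_foldA (lines : List String) :
    heuristic_headings lines = (lines.foldl stepA ([], none)).1 := rfl

theorem decide_lt_eq_not_le (a b : Nat) : decide (a < b) = !decide (b ≤ a) := by
  by_cases h : b ≤ a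
  · simp [h, Nat.not_lt.mpr h]
  · simp [h, Nat.not_le.mp h]

theorem detect_eq (ln : String) :
    detectHeading ln = if condA ln then some (PySem.Str.strip ln) else none := by
  unfold detectHeading condA
  dsimp only
  simp only [PySem.Str.toList_strip, decide_lt_eq_not_le]
  generalize (PySem.Chars.strip ln.toList).isEmpty = b0
  generalize pyIstitle (PySem.Chars.strip ln.toList) = bt
  generalize pyIsupperStr (List.take 1 (PySem.Chars.strip ln.toList)) = bu
  generalize (List.drop 1 (PySem.Chars.strip ln.toList)).any PySem.Chars.islower = ba
  generalize pyIsupperStr (PySem.Chars.strip ln.toList) = bc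
  generalize decide ((PySem.Chars.split₀ (PySem.Chars.strip ln.toList)).length ≤ 12) = d1
  generalize decide ((PySem.Chars.strip ln.toList).length ≤ 120) = d2
  cases b0 <;> cases bt <;> cases bu <;> cases ba <;> cases bc <;> cases d1 <;> cases d2 <;> rfl

theorem stepA_eq (st : List (Option String) × Option String) (ln : String) :
    stepA st ln = (st.1 ++ [updA st.2 ln], updA st.2 ln) := by
  unfold stepA updA condA
  dsimp only
  simp only [PySem.Str.toList_strip]
  generalize (PySem.Chars.strip ln.toList).isEmpty = b0
  generalize pyIstitle (PySem.Chars.strip ln.toList) = bt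
  generalize pyIsupperStr (List.take 1 (PySem.Chars.strip ln.toList)) = bu
  generalize (List.drop 1 (PySem.Chars.strip ln.toList)).any PySem.Chars.islower = ba
  generalize pyIsupperStr (PySem.Chars.strip ln.toList) = bc
  generalize decide ((PySem.Chars.split₀ (PySem.Chars.strip ln.toList)).length ≤ 12) = d1
  generalize decide ((PySem.Chars.strip ln.toList).length ≤ 120) = d2
  cases b0 <;> cases bt <;> cases bu <;> cases ba <;> cases bc <;> cases d1 <;> cases d2 <;> rfl

theorem fold_eq_fill (lines : List String) (hs : List (Option String)) (last : Option String) :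
    (lines.foldl stepA (hs, last)).1 = hs ++ fillForward last (lines.map detectHeading) := by
  induction lines generalizing hs last with
  | nil => simp [fillForward]
  | cons ln rest ih =>
    rw [List.foldl_cons, stepA_eq, List.map_cons, detect_eq]
    cases hc : condA ln <;>
      simp [updA, hc, fillForward, ih]

theorem marksFrom_ge (lines : List String) (k : Nat) :
    ∀ p ∈ marksFrom k lines, k ≤ p.1 := by
  induction lines generalizing k with
  | nil => intro p hp; simp [marksFrom] at hp
  | cons ln rest ih =>
    intro p hp
    unfold marksFrom at hp
    cases hd : detectHeading ln with
    | some s =>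
      rw [hd] at hp
      rcases List.mem_cons.mp hp with h | h
      · simp [h]
      · exact Nat.le_of_succ_le (ih (k + 1) p h)
    | none =>
      rw [hd] at hp
      exact Nat.le_of_succ_le (ih (k + 1) p hp)

theorem fill_eq_spans (lines : List String) (k : Nat) (cur : Option String) :
    fillForward cur (lines.map detectHeading) =
      match marksFrom k lines with
      | [] => List.replicate lines.length cur
      | (i0, _) :: _ => List.replicate (i0 - k) cur ++ spans (marksFrom k lines) (k + lines.length) := by
  induction lines generalizing k cur with
  | nil => simp [marksFrom, fillForward]
  | cons ln rest ih =>
    unfold marksFrom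
    cases hd : detectHeading ln with
    | none =>
      simp only [List.map_cons, hd, fillForward, Option.isSome_none, Bool.false_eq_true, if_false]
      rw [ih (k + 1) cur]
      cases hm : marksFrom (k + 1) rest with
      | nil => simp [List.replicate_succ]
      | cons p ps =>
        obtain ⟨i0, s0⟩ := p
        have hge : k + 1 ≤ i0 := marksFrom_ge rest (k + 1) (i0, s0) (by rw [hm]; exact List.mem_cons_self)
        simp only
        have h1 : i0 - k = (i0 - (k + 1)) + 1 := by omega
        have h2 : k + (rest.length + 1) = (k + 1) + rest.length := by omega
        rw [List.length_cons, h1, h2, List.replicate_succ]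
        simp
    | some s =>
      simp only [List.map_cons, hd, fillForward, Option.isSome_some, if_true]
      rw [ih (k + 1) (some s)]
      cases hm : marksFrom (k + 1) rest with
      | nil =>
        simp only [spans, Nat.sub_self, List.replicate_zero, List.nil_append, List.length_cons]
        have : k + (rest.length + 1) - k = rest.length + 1 := by omega
        rw [this, List.replicate_succ]
      | cons p ps =>
        obtain ⟨j, t⟩ := p
        have hge : k + 1 ≤ j := marksFrom_ge rest (k + 1) (j, t) (by rw [hm]; exact List.mem_cons_self)
        simp only [spans, Nat.sub_self, List.replicate_zero, List.nil_append, List.length_cons]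
        have h1 : j - k = (j - (k + 1)) + 1 := by omega
        have h2 : k + (rest.length + 1) = (k + 1) + rest.length := by omega
        rw [h1, h2, List.replicate_succ]
        simp

-- ===== VERDICT (by name: the statement is the Claim_ definition above) =====
theorem heuristic_headings_spec : Claim_equal_heuristic_headings := by
  intro lines _
  unfold Spec_heuristic_headings heuristic_headings_alt
  rw [heuristic_headings_eq_foldA]
  have h := fold_eq_fill lines [] none
  rw [List.nil_append] at h
  rw [h, fill_eq_spans lines 0 none]
  cases hm : marksFrom 0 lines with
  | nil => simp
  | cons p ps =>
    obtain ⟨i0, s0⟩ := p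
    simp
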